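-- pv_equiv track=rewrite | github.com/crabdriver/tiandidistribute | tiandi_engine/importers/normalize.py | split_txt_title_body
-- ===== SOURCE A (Python) =====
-- from typing import Tuple
--
-- def split_txt_title_body(normalized: str) -> Tuple[str, str]:
--     if not normalized:
--         return "", ""
--     lines = normalized.split("\n")
--     for i, line in enumerate(lines):
--         stripped = line.strip()
--         if stripped:
--             title = stripped
--             body_raw = "\n".join(lines[i + 1 :])
--             return title, body_raw
--     return "", normalized
-- ===== SOURCE B (Python) =====
-- def split_txt_title_body(normalized):
--     rest = normalized
--     while True:
--         head, sep, tail = rest.partition("\n")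
--         title = head.strip()
--         if title:
--             return title, tail
--         if not sep:
--             return "", normalized
--         rest = tail
-- ===== Notes on version B (the rewrite author's own statement) =====
-- stated objective: simpler
-- what changed: B drops the line-list + enumerate index + join rebuild: it keeps a single shrinking remainder string, peeling one line at a time with str.partition and returning the partition tail directly as the body.
import Mathlib
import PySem

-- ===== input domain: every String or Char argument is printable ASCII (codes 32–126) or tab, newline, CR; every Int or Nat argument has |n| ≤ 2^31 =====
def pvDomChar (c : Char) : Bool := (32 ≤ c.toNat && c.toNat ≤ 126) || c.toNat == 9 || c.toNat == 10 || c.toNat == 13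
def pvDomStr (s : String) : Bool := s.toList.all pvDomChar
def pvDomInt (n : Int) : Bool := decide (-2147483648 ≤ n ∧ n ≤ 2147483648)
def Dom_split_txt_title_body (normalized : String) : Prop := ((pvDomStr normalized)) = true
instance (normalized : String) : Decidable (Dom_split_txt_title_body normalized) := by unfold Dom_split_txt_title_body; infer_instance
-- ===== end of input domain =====

-- B replaces A's split-into-a-line-list + index + rejoin with a single shrinking-remainder
-- loop via str.partition, returning the tail directly; objective: simpler (no speed claim).

-- ===== PORT A =====
-- the 'for i, line in enumerate(lines)' loop: at index i, 'lines[i+1:]' is the rest of the list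
def pvALoop : List (List Char) → Option (List Char × List Char)
  | [] => none
  | line :: rest =>
    let stripped := PySem.Chars.strip line
    if stripped ≠ [] then some (stripped, PySem.Chars.join ['\n'] rest)
    else pvALoop rest

def split_txt_title_body (normalized : String) : String × String :=
  if normalized = "" then ("", "")
  else
    match pvALoop (PySem.Chars.splitOn normalized.toList ['\n']) with
    | some (t, b) => (String.ofList t, String.ofList b)
    | none => ("", normalized)

-- ===== PORT B =====
-- termination: when '\n' ∈ rest the head is a proper prefix, so the tail is shorter
theorem pvTailLt (rest : List Char) (h : '\n' ∈ rest) :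
    (rest.drop ((rest.takeWhile (· != '\n')).length + 1)).length < rest.length := by
  have hne : rest.takeWhile (· != '\n') ≠ rest := by
    intro he
    have := (List.takeWhile_eq_self_iff).1 he _ h
    simp at this
  have hle : (rest.takeWhile (· != '\n')).length ≤ rest.length :=
    (List.takeWhile_prefix _).length_le
  have hlt : (rest.takeWhile (· != '\n')).length < rest.length := by
    rcases lt_or_eq_of_le hle with h' | h'
    · exact h'
    · exact absurd ((List.takeWhile_prefix _).eq_of_length h') hne
  have : rest ≠ [] := by rintro rfl; simp at h
  simp [List.length_drop]
  omega

-- rest.partition('\n'):  head = chars before the first '\n', tail = chars after it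
-- (if there is no '\n', head = rest and tail = []) — ported by hand, exact
def pvBGo (orig : String) (rest : List Char) : String × String :=
  let head := rest.takeWhile (· != '\n')
  let title := PySem.Chars.strip head
  let tail := rest.drop (head.length + 1)
  if title ≠ [] then (String.ofList title, String.ofList tail)
  else if h : '\n' ∈ rest then pvBGo orig tail
  else ("", orig)
termination_by rest.length
decreasing_by exact pvTailLt rest h

def split_txt_title_body_alt (normalized : String) : String × String :=
  pvBGo normalized normalized.toList

-- ===== PRECONDITION & SPEC =====
def Spec_split_txt_title_body (normalized : String) (out : String × String) : Prop := out = split_txt_title_body_alt normalized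
instance (normalized : String) (out : String × String) : Decidable (Spec_split_txt_title_body normalized out) := by unfold Spec_split_txt_title_body; infer_instance

-- ===== CLAIM (what is proved, stated in full; the proofs are below) =====
def Claim_equal_split_txt_title_body : Prop := ∀ (normalized : String), Dom_split_txt_title_body normalized → Spec_split_txt_title_body normalized (split_txt_title_body normalized)

-- ===== LEMMAS AND PROOFS =====

-- reference recursive form of splitting on '\n'
def pvSp (l : List Char) : List (List Char) :=
  let head := l.takeWhile (· != '\n')
  if h : '\n' ∈ l then head :: pvSp (l.drop (head.length + 1)) else [l]
termination_by l.length
decreasing_by exact pvTailLt l h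

theorem pvSp_eq (l : List Char) :
    pvSp l = l.takeWhile (· != '\n') ::
      (if '\n' ∈ l then pvSp (l.drop ((l.takeWhile (· != '\n')).length + 1)) else []) := by
  rw [pvSp]
  by_cases h : '\n' ∈ l
  · simp [h]
  · have : l.takeWhile (· != '\n') = l := by
      rw [List.takeWhile_eq_self_iff]
      intro x hx
      simp
      rintro rfl
      exact h hx
    simp [h, this]

theorem pvDecomp (l : List Char) (h : '\n' ∈ l) :
    l = l.takeWhile (· != '\n') ++ '\n' :: l.drop ((l.takeWhile (· != '\n')).length + 1) := by
  have happ : l.takeWhile (· != '\n') ++ l.dropWhile (· != '\n') = l :=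
    List.takeWhile_append_dropWhile
  have hdwne : l.dropWhile (· != '\n') ≠ [] := by
    intro he
    have := List.dropWhile_eq_nil_iff.1 he _ h
    simp at this
  obtain ⟨d, dt, hdw⟩ := List.exists_cons_of_ne_nil hdwne
  have hd : d = '\n' := by
    have h2 := List.head_dropWhile_not (· != '\n') (l := l) hdwne
    simpa [hdw] using h2
  have hdrop : l.drop ((l.takeWhile (· != '\n')).length) = l.dropWhile (· != '\n') := by
    have h3 := List.drop_left (l₁ := l.takeWhile (· != '\n')) (l₂ := l.dropWhile (· != '\n'))
    rw [happ] at h3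
    exact h3
  have hdrop1 : l.drop ((l.takeWhile (· != '\n')).length + 1) = dt := by
    have h1 : l.drop ((l.takeWhile (· != '\n')).length + 1) =
        (l.drop ((l.takeWhile (· != '\n')).length)).drop 1 := by
      rw [List.drop_drop]
    rw [h1, hdrop, hdw]
    simp
  rw [hdrop1]
  conv_lhs => rw [← happ, hdw, hd]

theorem pvSp_head_tail (l : List Char) : (pvSp l).head! :: (pvSp l).tail = pvSp l := by
  rw [pvSp_eq l]
  simp

theorem pvGo_eq (fuel : Nat) (l cur : List Char) (acc : List (List Char))
    (hf : l.length < fuel) :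
    PySem.Chars.splitOn.go ['\n'] fuel l cur acc =
      acc.reverse ++ (cur.reverse ++ (pvSp l).head!) :: (pvSp l).tail := by
  induction fuel generalizing l cur acc with
  | zero => omega
  | succ fuel ih =>
    cases l with
    | nil =>
      rw [PySem.Chars.splitOn.go, pvSp_eq]
      · simp
      all_goals omega
    | cons c rest =>
      rw [PySem.Chars.splitOn.go]
      by_cases hc : c = '\n'
      · subst hc
        have hpre : List.isPrefixOf ['\n'] ('\n' :: rest) = true := by simp [List.isPrefixOf]
        simp only [hpre, if_pos]
        rw [show List.drop (['\n'].length) ('\n' :: rest) = rest from rfl]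
        rw [ih rest [] (cur.reverse :: acc) (by simp at hf ⊢; omega)]
        rw [pvSp_eq ('\n' :: rest)]
        have h' : '\n' ∈ '\n' :: rest := List.mem_cons_self
        simp only [h', if_pos, List.takeWhile_cons]
        simp [pvSp_head_tail]
      · have hpre : List.isPrefixOf ['\n'] (c :: rest) = false := by
          simp [List.isPrefixOf]; exact fun h => absurd h.symm hc
        simp only [hpre, Bool.false_eq_true, if_false]
        rw [ih rest (c :: cur) acc (by simp at hf ⊢; omega)]
        rw [pvSp_eq (c :: rest)]
        have htw : (c :: rest).takeWhile (· != '\n') = c :: rest.takeWhile (· != '\n') := by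
          simp [List.takeWhile_cons, hc]
        rw [pvSp_eq rest]
        by_cases h : '\n' ∈ rest
        · have h' : '\n' ∈ c :: rest := List.mem_cons_of_mem _ h
          simp [htw, h, h']
        · have h' : '\n' ∉ c :: rest := by simp [Ne.symm hc, h]
          have : rest.takeWhile (· != '\n') = rest := by
            rw [List.takeWhile_eq_self_iff]
            intro x hx
            simp
            rintro rfl
            exact h hx
          simp [htw, h, h', this]

theorem pvSplitOn_eq (l : List Char) : PySem.Chars.splitOn l ['\n'] = pvSp l := by
  rw [PySem.Chars.splitOn, pvGo_eq (l.length + 1) l [] [] (by omega)]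
  rw [pvSp_eq l]
  simp

theorem pvJoin_pvSp (l : List Char) : PySem.Chars.join ['\n'] (pvSp l) = l := by
  induction hn : l.length using Nat.strong_induction_on generalizing l with
  | _ n ih =>
  subst hn
  rw [pvSp_eq l]
  by_cases h : '\n' ∈ l
  · simp only [h, if_pos]
    set tail := l.drop ((l.takeWhile (· != '\n')).length + 1) with ht
    rw [pvSp_eq tail]
    rw [PySem.Chars.join_cons_cons]
    rw [← pvSp_eq tail, ih _ (pvTailLt l h) _ rfl]
    conv_rhs => rw [pvDecomp l h]
    simp [← ht]
  · have : l.takeWhile (· != '\n') = l := by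
      rw [List.takeWhile_eq_self_iff]
      intro x hx
      simp
      rintro rfl
      exact h hx
    simp [h, this, PySem.Chars.join_singleton]

theorem pvMain (orig : String) (l : List Char) :
    pvBGo orig l =
      match pvALoop (pvSp l) with
      | some (t, b) => (String.ofList t, String.ofList b)
      | none => ("", orig) := by
  induction hn : l.length using Nat.strong_induction_on generalizing l with
  | _ n ih =>
  subst hn
  rw [pvBGo, pvSp_eq l]
  by_cases h : '\n' ∈ l
  · simp only [h, if_pos, dif_pos]
    by_cases hs : PySem.Chars.strip (l.takeWhile (· != '\n')) = []
    · simp only [pvALoop, hs, ne_eq, not_true_eq_false, if_false]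
      exact ih _ (pvTailLt l h) _ rfl
    · simp only [pvALoop, hs, ne_eq, not_false_eq_true, if_true]
      rw [pvJoin_pvSp]
  · have htw : l.takeWhile (· != '\n') = l := by
      rw [List.takeWhile_eq_self_iff]
      intro x hx
      simp
      rintro rfl
      exact h hx
    simp only [h, if_neg, htw]
    by_cases hs : PySem.Chars.strip l = []
    · simp [pvALoop, hs]
    · have : l.drop (l.length + 1) = [] := List.drop_eq_nil_of_le (by omega)
      simp [pvALoop, hs, this, PySem.Chars.join_nil]

-- ===== VERDICT (by name: the statement is the Claim_ definition above) =====
theorem split_txt_title_body_spec : Claim_equal_split_txt_title_body := by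
  intro normalized _
  unfold Spec_split_txt_title_body split_txt_title_body split_txt_title_body_alt
  rw [pvSplitOn_eq, pvMain]
  by_cases h : normalized = ""
  · subst h
    rw [pvSp_eq]
    simp [pvALoop, PySem.Chars.strip, PySem.Chars.lstrip, PySem.Chars.rstrip]
  · simp [h]
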